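-- pv_equiv track=rewrite | github.com/jacattac314/JD-Automation-System | modules/ideation.py | _categorize_skills
-- ===== SOURCE A (Python) =====
-- from typing import Dict, List, Any
--
-- def _categorize_skills(skills: List[str]) -> str:
--     """Determine primary category from skills."""
--     skills_lower = [s.lower() for s in skills]
--
--     # Count matches for each category
--     ml_count = sum(1 for s in skills_lower if s in ["python", "machine learning", "deep learning", "ai", "nlp", "tensorflow", "pytorch"])
--     web_count = sum(1 for s in skills_lower if s in ["react", "angular", "vue", "node.js", "django", "flask", "javascript"])
--     cloud_count = sum(1 for s in skills_lower if s in ["aws", "azure", "gcp", "docker", "kubernetes", "terraform"])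
--     mobile_count = sum(1 for s in skills_lower if s in ["react native", "flutter", "swift", "kotlin"])
--
--     if ml_count >= 2:
--         return "data_ml"
--     elif cloud_count >= 2:
--         return "cloud_devops"
--     elif mobile_count >= 1:
--         return "mobile"
--     else:
--         return "web_fullstack"
-- ===== SOURCE B (Python) =====
-- _CATEGORY_OF = {}
-- for _cat, _skills in (
--     ("data_ml", ["python", "machine learning", "deep learning", "ai", "nlp", "tensorflow", "pytorch"]),
--     ("web_fullstack", ["react", "angular", "vue", "node.js", "django", "flask", "javascript"]),
--     ("cloud_devops", ["aws", "azure", "gcp", "docker", "kubernetes", "terraform"]),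
--     ("mobile", ["react native", "flutter", "swift", "kotlin"]),
-- ):
--     for _s in _skills:
--         _CATEGORY_OF[_s] = _cat
--
--
-- def _categorize_skills(skills):
--     """Determine primary category from skills (single pass over an inverted map)."""
--     ml = cloud = mobile = 0
--     for s in skills:
--         cat = _CATEGORY_OF.get(s.lower())
--         if cat == "data_ml":
--             ml += 1
--         elif cat == "cloud_devops":
--             cloud += 1
--         elif cat == "mobile":
--             mobile += 1
--     if ml >= 2:
--         return "data_ml"
--     if cloud >= 2:
--         return "cloud_devops"
--     if mobile >= 1:
--         return "mobile"
--     return "web_fullstack"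
-- ===== Notes on version B (the rewrite author's own statement) =====
-- stated objective: faster
-- what changed: Replaces four separate membership-scan counting passes over the skill list with one inverted skill-to-category dict built once at module load and a single pass over the skills that increments the looked-up category's counter; the unused web counter is dropped.
import Mathlib
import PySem

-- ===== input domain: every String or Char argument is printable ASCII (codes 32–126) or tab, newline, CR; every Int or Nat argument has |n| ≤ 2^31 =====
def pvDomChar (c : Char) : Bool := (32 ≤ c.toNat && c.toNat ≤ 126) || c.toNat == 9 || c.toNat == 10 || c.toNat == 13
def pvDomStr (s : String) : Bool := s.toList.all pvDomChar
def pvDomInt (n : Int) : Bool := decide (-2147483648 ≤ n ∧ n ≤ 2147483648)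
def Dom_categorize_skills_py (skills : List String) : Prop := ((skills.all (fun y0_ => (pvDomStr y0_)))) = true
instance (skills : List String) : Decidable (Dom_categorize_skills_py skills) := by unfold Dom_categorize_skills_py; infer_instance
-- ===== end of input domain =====

-- B replaces A's four membership-scan counting passes by one inverted skill→category map and a single counting pass (objective: alternative).

-- ===== PORT A =====
def pvMlL : List String := ["python", "machine learning", "deep learning", "ai", "nlp", "tensorflow", "pytorch"]
def pvWebL : List String := ["react", "angular", "vue", "node.js", "django", "flask", "javascript"]
def pvCloudL : List String := ["aws", "azure", "gcp", "docker", "kubernetes", "terraform"]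
def pvMobileL : List String := ["react native", "flutter", "swift", "kotlin"]

def categorize_skills_py (skills : List String) : String :=
  let skills_lower := skills.map PySem.Str.lower
  let ml_count : Int := skills_lower.foldl (fun acc s => if pvMlL.contains s then acc + 1 else acc) 0
  let _web_count : Int := skills_lower.foldl (fun acc s => if pvWebL.contains s then acc + 1 else acc) 0
  let cloud_count : Int := skills_lower.foldl (fun acc s => if pvCloudL.contains s then acc + 1 else acc) 0
  let mobile_count : Int := skills_lower.foldl (fun acc s => if pvMobileL.contains s then acc + 1 else acc) 0
  if ml_count ≥ 2 then "data_ml"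
  else if cloud_count ≥ 2 then "cloud_devops"
  else if mobile_count ≥ 1 then "mobile"
  else "web_fullstack"

-- ===== PORT B =====
-- the module-level table (category, its skills) and the inverted map built from it by the two nested loops of Source B
def pvCatTable : List (String × List String) :=
  [("data_ml", pvMlL), ("web_fullstack", pvWebL), ("cloud_devops", pvCloudL), ("mobile", pvMobileL)]

def pvCategoryOf : PySem.Dict String String :=
  pvCatTable.foldl (fun d p => p.2.foldl (fun d s => d.insert s p.1) d) PySem.Dict.empty

-- one loop iteration of Source B: look the lowered skill up, bump the matching counter
def pvStep (st : Int × Int × Int) (s : String) : Int × Int × Int :=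
  match pvCategoryOf.get? (PySem.Str.lower s) with
  | some cat =>
      if cat == "data_ml" then (st.1 + 1, st.2.1, st.2.2)
      else if cat == "cloud_devops" then (st.1, st.2.1 + 1, st.2.2)
      else if cat == "mobile" then (st.1, st.2.1, st.2.2 + 1)
      else st
  | none => st

def categorize_skills_py_alt (skills : List String) : String :=
  let st := skills.foldl pvStep (0, 0, 0)
  if st.1 ≥ 2 then "data_ml"
  else if st.2.1 ≥ 2 then "cloud_devops"
  else if st.2.2 ≥ 1 then "mobile"
  else "web_fullstack"

-- ===== PRECONDITION & SPEC =====
def Spec_categorize_skills_py (skills : List String) (out : String) : Prop := out = categorize_skills_py_alt skills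
instance (skills : List String) (out : String) : Decidable (Spec_categorize_skills_py skills out) := by unfold Spec_categorize_skills_py; infer_instance

-- ===== CLAIM (what is proved, stated in full; the proofs are below) =====
def Claim_equal_categorize_skills_py : Prop := ∀ (skills : List String), Dom_categorize_skills_py skills → Spec_categorize_skills_py skills (categorize_skills_py skills)

-- ===== LEMMAS AND PROOFS =====

-- two disjoint literal lists cannot both contain the same string
theorem pvDisjoint (a b : List String) (hd : a.all (fun x => !(b.contains x)) = true)
    (s : String) (h1 : a.contains s = true) (h2 : b.contains s = true) : False := by
  have h1' : s ∈ a := by simpa using h1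
  have h2' : s ∈ b := by simpa using h2
  have := List.all_eq_true.mp hd s h1'
  simp at this
  exact this h2'

-- lookup in a block of keys that all map to the same category
theorem pvGet_blocks (cat : String) (keys : List String) (rest : List (String × String)) (s : String) :
    (PySem.Dict.mk (keys.map (fun k => (k, cat)) ++ rest)).get? s =
      (if keys.contains s then some cat else (PySem.Dict.mk rest).get? s) := by
  induction keys with
  | nil => simp
  | cons k ks ih =>
    rw [List.map_cons, List.cons_append, PySem.Dict.get?_mk_cons, ih, List.contains_cons]
    cases h : (k == s) with
    | false =>
      have hne : s ≠ k := Ne.symm (beq_eq_false_iff_ne.mp h)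
      simp [hne]
    | true =>
      have hk : k = s := beq_iff_eq.mp h
      subst hk
      simp

-- the inverted map classifies a string exactly as the four (disjoint) literal lists do
theorem pvLookup_cases (s : String) :
    pvCategoryOf.get? s =
      (if pvMlL.contains s then some "data_ml"
       else if pvWebL.contains s then some "web_fullstack"
       else if pvCloudL.contains s then some "cloud_devops"
       else if pvMobileL.contains s then some "mobile"
       else none) := by
  have h : pvCategoryOf =
      PySem.Dict.mk (pvMlL.map (fun k => (k, "data_ml")) ++
        (pvWebL.map (fun k => (k, "web_fullstack")) ++
          (pvCloudL.map (fun k => (k, "cloud_devops")) ++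
            (pvMobileL.map (fun k => (k, "mobile")) ++ [])))) := by decide
  rw [h, pvGet_blocks, pvGet_blocks, pvGet_blocks, pvGet_blocks]
  rfl

set_option maxHeartbeats 2000000 in
theorem pvStep_eq (st : Int × Int × Int) (s : String) :
    pvStep st s =
      (st.1 + (if pvMlL.contains (PySem.Str.lower s) then 1 else 0),
       st.2.1 + (if pvCloudL.contains (PySem.Str.lower s) then 1 else 0),
       st.2.2 + (if pvMobileL.contains (PySem.Str.lower s) then 1 else 0)) := by
  obtain ⟨a, b, c⟩ := st
  unfold pvStep
  rw [pvLookup_cases]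
  split_ifs <;>
    first
      | exact (pvDisjoint pvMlL pvWebL (by decide) _ ‹_› ‹_›).elim
      | exact (pvDisjoint pvMlL pvCloudL (by decide) _ ‹_› ‹_›).elim
      | exact (pvDisjoint pvMlL pvMobileL (by decide) _ ‹_› ‹_›).elim
      | exact (pvDisjoint pvWebL pvCloudL (by decide) _ ‹_› ‹_›).elim
      | exact (pvDisjoint pvWebL pvMobileL (by decide) _ ‹_› ‹_›).elim
      | exact (pvDisjoint pvCloudL pvMobileL (by decide) _ ‹_› ‹_›).elim
      | simp

theorem pvFold_eq (l : List String) (st : Int × Int × Int) :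
    l.foldl pvStep st =
      ((l.map PySem.Str.lower).foldl (fun acc s => if pvMlL.contains s then acc + 1 else acc) st.1,
       (l.map PySem.Str.lower).foldl (fun acc s => if pvCloudL.contains s then acc + 1 else acc) st.2.1,
       (l.map PySem.Str.lower).foldl (fun acc s => if pvMobileL.contains s then acc + 1 else acc) st.2.2) := by
  induction l generalizing st with
  | nil => rfl
  | cons x xs ih =>
    simp only [List.foldl_cons, List.map_cons, ih, pvStep_eq]
    split_ifs <;> simp

-- ===== VERDICT (by name: the statement is the Claim_ definition above) =====
theorem categorize_skills_py_spec : Claim_equal_categorize_skills_py := by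
  intro skills _
  unfold Spec_categorize_skills_py categorize_skills_py categorize_skills_py_alt
  rw [pvFold_eq]
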